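-- pv_equiv track=rewrite | github.com/dkdk22/Rubik_project | vscode/rubik2.py | state_to_position_dict
-- ===== SOURCE A (Python) =====
-- def state_to_position_dict(state):
--     """Converts a state string to a dictionary of positions keyed by the color."""
--     color_positions = {}
--     colors = state.split()
--     for index, color in enumerate(colors):
--         for c in color:
--             if c not in color_positions:
--                 color_positions[c] = []
--             color_positions[c].append(index)
--     return color_positions
-- ===== SOURCE B (Python) =====
-- def state_to_position_dict(state):
--     """Converts a state string to a dictionary of positions keyed by the color."""
--     pairs = [(c, i) for i, tok in enumerate(state.split()) for c in tok]
--     keys = dict.fromkeys(c for c, _ in pairs)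
--     return {c: [i for d, i in pairs if d == c] for c in keys}
-- ===== Notes on version B (the rewrite author's own statement) =====
-- stated objective: alternative
-- what changed: Replaces the accumulate-if-absent dict loop by a materialize-then-group pipeline: flatten to (char, index) pairs once, take first-occurrence-ordered distinct keys with dict.fromkeys, and build each value list by a filter over the pairs.
import Mathlib
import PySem

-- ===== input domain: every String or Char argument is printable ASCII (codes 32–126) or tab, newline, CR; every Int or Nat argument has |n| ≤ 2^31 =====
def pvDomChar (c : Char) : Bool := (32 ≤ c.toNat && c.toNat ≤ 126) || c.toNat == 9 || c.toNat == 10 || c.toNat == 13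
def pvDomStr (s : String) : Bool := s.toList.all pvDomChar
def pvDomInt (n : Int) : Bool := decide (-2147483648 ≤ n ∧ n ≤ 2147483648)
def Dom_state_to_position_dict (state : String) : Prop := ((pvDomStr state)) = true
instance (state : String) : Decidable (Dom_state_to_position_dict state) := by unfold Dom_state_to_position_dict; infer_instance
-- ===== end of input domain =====

-- B groups (char, index) pairs materialized in one flat pass instead of A's accumulate-if-absent dict loop; alternative decomposition, same results.

-- ===== PORT A =====
def state_to_position_dict (state : String) : List (String × List Int) :=
  let colors := PySem.Str.split₀ state
  ((PySem.List.enumerate colors).foldl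
    (fun cp p =>
      p.2.toList.foldl
        (fun cp c =>
          let key := String.ofList [c]
          let cp := if cp.contains key then cp else cp.insert key ([] : List Int)
          cp.modify key [] (· ++ [p.1]))
        cp)
    PySem.Dict.empty).items

-- ===== PORT B =====
def state_to_position_dict_alt (state : String) : List (String × List Int) :=
  let pairs := (PySem.List.enumerate (PySem.Str.split₀ state)).flatMap
      (fun p => p.2.toList.map (fun c => (String.ofList [c], p.1)))
  let keys := PySem.List.dedup (pairs.map (·.1))
  keys.map (fun c => (c, (pairs.filter (fun q => q.1 == c)).map (·.2)))

-- ===== PRECONDITION & SPEC =====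
def Spec_state_to_position_dict (state : String) (out : List (String × List Int)) : Prop := out = state_to_position_dict_alt state
instance (state : String) (out : List (String × List Int)) : Decidable (Spec_state_to_position_dict state out) := by unfold Spec_state_to_position_dict; infer_instance

-- ===== CLAIM (what is proved, stated in full; the proofs are below) =====
def Claim_equal_state_to_position_dict : Prop := ∀ (state : String), Dom_state_to_position_dict state → Spec_state_to_position_dict state (state_to_position_dict state)

-- ===== LEMMAS AND PROOFS =====

-- A's "if absent insert []; then append" step is the single modify-with-default step.
theorem pv_step_eq (d : PySem.Dict String (List Int)) (k : String) (i : Int) :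
    (if d.contains k then d else d.insert k ([] : List Int)).modify k [] (· ++ [i])
      = d.modify k [] (· ++ [i]) := by
  by_cases h : d.contains k = true
  · simp [h]
  · simp only [h, Bool.false_eq_true, if_false]
    simp [PySem.Dict.modify, PySem.Dict.getD_insert_self, PySem.Dict.insert_insert_self,
      PySem.Dict.getD_of_not_contains d ([] : List Int) (by simpa using h)]

-- ===== VERDICT (by name: the statement is the Claim_ definition above) =====
theorem state_to_position_dict_spec : Claim_equal_state_to_position_dict := by
  intro state _
  unfold Spec_state_to_position_dict state_to_position_dict state_to_position_dict_alt
  set pairs := (PySem.List.enumerate (PySem.Str.split₀ state)).flatMap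
      (fun p => p.2.toList.map (fun c => (String.ofList [c], p.1))) with hpairs
  have hfold :
      (PySem.List.enumerate (PySem.Str.split₀ state)).foldl
        (fun cp p =>
          p.2.toList.foldl
            (fun cp c =>
              let key := String.ofList [c]
              let cp := if cp.contains key then cp else cp.insert key ([] : List Int)
              cp.modify key [] (· ++ [p.1]))
            cp)
        PySem.Dict.empty
      = pairs.foldl (fun d q => d.modify q.1 [] (· ++ [q.2])) PySem.Dict.empty := by
    rw [hpairs, List.foldl_flatMap]
    apply PySem.List.foldl_congr_mem
    intro d p _
    rw [List.foldl_map]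
    apply PySem.List.foldl_congr_mem
    intro d' c _
    exact pv_step_eq d' (String.ofList [c]) p.1
  simp only [hfold]
  have hnd : (pairs.foldl (fun d q => d.modify q.1 [] (· ++ [q.2])) PySem.Dict.empty).keys.Nodup :=
    PySem.Dict.nodup_keys_foldl_modify_key pairs Prod.fst ([] : List Int)
      (fun _ q _ => _ ++ [q.2]) PySem.Dict.empty (by simp)
  have hkeys : (pairs.foldl (fun d q => d.modify q.1 [] (· ++ [q.2])) PySem.Dict.empty).keys
      = PySem.List.dedup (pairs.map (·.1)) := by
    rw [PySem.Dict.keys_foldl_modify_key pairs Prod.fst ([] : List Int)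
      (fun _ q _ => _ ++ [q.2]) PySem.Dict.empty]
    simp [PySem.Dict.keys_empty, PySem.Set.update, PySem.Set.ofList_eq_foldl,
      PySem.List.dedup_eq_ofList]
  rw [PySem.Dict.items_eq_map_keys _ hnd ([] : List Int), hkeys]
  apply List.map_congr_left
  intro c _
  rw [PySem.Dict.getD_foldl_modify_append pairs PySem.Dict.empty c]
  simp [PySem.Dict.getD_empty]
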